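-- pv_equiv track=rewrite | github.com/Cheenya/zbx-hg-grafana-migration | v2/zabbix_audit.py | _mapping_candidates_by_oldid
-- ===== SOURCE A (Python) =====
-- from collections import Counter, defaultdict
-- from typing import Any, Dict, List, Sequence, Set
--
-- def _mapping_candidates_by_oldid(rows: Sequence[Dict[str, Any]]) -> Dict[str, List[Dict[str, Any]]]:
--     bucket: Dict[str, List[Dict[str, Any]]] = defaultdict(list)
--     for row in rows:
--         old_groupid = str(row.get("old_groupid") or "").strip()
--         if not old_groupid:
--             continue
--         bucket[old_groupid].append(row)
--     for candidates in bucket.values():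
--         candidates.sort(key=lambda item: (int(item.get("candidate_rank") or 0), str(item.get("new_group") or "").lower()))
--     return bucket
-- ===== SOURCE B (Python) =====
-- from collections import defaultdict
--
--
-- def _mapping_candidates_by_oldid(rows):
--     # Pair each row with its (non-empty) old_groupid once, up front.
--     keyed = []
--     for row in rows:
--         gid = str(row.get("old_groupid") or "").strip()
--         if gid:
--             keyed.append((gid, row))
--     bucket = defaultdict(list)
--     # Fix the key order to first appearance in the input, as A's insertion does.
--     for gid in dict.fromkeys(g for g, _ in keyed):
--         bucket[gid] = []
--     # One global stable sort; distributing it over the buckets keeps each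
--     # bucket exactly in the order A's per-bucket sort produces.
--     keyed.sort(key=lambda p: (int(p[1].get("candidate_rank") or 0),
--                               str(p[1].get("new_group") or "").lower()))
--     for gid, row in keyed:
--         bucket[gid].append(row)
--     return bucket
-- ===== Notes on version B (the rewrite author's own statement) =====
-- stated objective: alternative
-- what changed: B replaces A's build-buckets-then-sort-each-bucket scheme by one global stable sort of the (gid,row) pairs followed by a single distribution pass into pre-seeded buckets; stability of the sort makes every bucket come out in exactly A's per-bucket order.
import Mathlib
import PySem

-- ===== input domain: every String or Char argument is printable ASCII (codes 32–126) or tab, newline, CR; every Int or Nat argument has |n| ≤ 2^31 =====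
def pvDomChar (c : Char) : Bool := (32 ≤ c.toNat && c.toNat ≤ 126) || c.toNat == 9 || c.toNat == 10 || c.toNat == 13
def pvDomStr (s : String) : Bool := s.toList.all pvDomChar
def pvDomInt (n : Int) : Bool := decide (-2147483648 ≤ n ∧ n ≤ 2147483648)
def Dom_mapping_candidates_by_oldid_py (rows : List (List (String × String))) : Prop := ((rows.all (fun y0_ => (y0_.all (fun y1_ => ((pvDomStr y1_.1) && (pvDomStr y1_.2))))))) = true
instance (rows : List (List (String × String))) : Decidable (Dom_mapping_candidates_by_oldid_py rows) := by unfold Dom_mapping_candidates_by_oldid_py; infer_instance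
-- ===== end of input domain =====

-- B replaces A's per-bucket sorts by one global stable sort followed by a single
-- distribution pass (objective: alternative decomposition, same exact result).

-- shared helpers: the three row expressions both Pythons compute
-- str(row.get("old_groupid") or "").strip()
def pvGid (row : List (String × String)) : String :=
  PySem.Str.strip ((PySem.Dict.get? (PySem.Dict.mk row) "old_groupid").getD "")

-- row.get("candidate_rank") or 0  (missing or "" → 0)
def pvRankStr (row : List (String × String)) : String :=
  (PySem.Dict.get? (PySem.Dict.mk row) "candidate_rank").getD ""

-- int(row.get("candidate_rank") or 0); int() raises ValueError outside Pre_, where .getD 0 is a stand-in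
def pvRank (row : List (String × String)) : Int :=
  if pvRankStr row = "" then 0 else (PySem.Int.ofStr? (pvRankStr row)).getD 0

-- str(row.get("new_group") or "").lower()
def pvLower (row : List (String × String)) : String :=
  PySem.Str.lower ((PySem.Dict.get? (PySem.Dict.mk row) "new_group").getD "")

-- ===== PORT A =====
def mapping_candidates_by_oldid_py (rows : List (List (String × String))) : List (String × List (List (String × String))) :=
  let bucket := rows.foldl (fun b row =>
      let g := pvGid row
      if g = "" then b
      else PySem.Dict.modify b g [] (fun v => v ++ [row]))
    (PySem.Dict.empty : PySem.Dict String (List (List (String × String))))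
  -- for candidates in bucket.values(): candidates.sort(key=…)
  bucket.items.map (fun kv => (kv.1, PySem.List.sorted2 kv.2 pvRank pvLower))

-- ===== PORT B =====
def mapping_candidates_by_oldid_py_alt (rows : List (List (String × String))) : List (String × List (List (String × String))) :=
  -- keyed = [(gid, row) …] built by one filtering pass
  let keyed := rows.foldl (fun acc row =>
      let g := pvGid row
      if g = "" then acc else acc ++ [(g, row)]) []
  -- for gid in dict.fromkeys(g for g, _ in keyed): bucket[gid] = []
  let seeded := (PySem.List.dedup (keyed.map Prod.fst)).foldl
      (fun b g => PySem.Dict.insert b g [])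
      (PySem.Dict.empty : PySem.Dict String (List (List (String × String))))
  -- keyed.sort(key=…)  (one global stable sort)
  let sortedKeyed := PySem.List.sorted2 keyed (fun p => pvRank p.2) (fun p => pvLower p.2)
  -- for gid, row in keyed: bucket[gid].append(row)
  let bucket := sortedKeyed.foldl (fun b p => PySem.Dict.modify b p.1 [] (fun v => v ++ [p.2])) seeded
  bucket.items

-- ===== PRECONDITION & SPEC =====
-- Pre_ excludes exactly the rows where Python's int(row.get("candidate_rank")) raises ValueError:
-- a bucketed row (non-empty old_groupid) whose candidate_rank is a non-empty non-integer string.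
def Pre_mapping_candidates_by_oldid_py (rows : List (List (String × String))) : Prop :=
  ∀ row ∈ rows, pvGid row ≠ "" →
    (pvRankStr row = "" ∨ (PySem.Int.ofStr? (pvRankStr row)).isSome = true)
instance (rows : List (List (String × String))) : Decidable (Pre_mapping_candidates_by_oldid_py rows) := by
  unfold Pre_mapping_candidates_by_oldid_py; infer_instance

def pvWitness_mapping_candidates_by_oldid_py : (List (List (String × String))) :=
  [[("old_groupid", "10"), ("candidate_rank", "2"), ("new_group", "Linux")],
   [("old_groupid", "10"), ("candidate_rank", "1"), ("new_group", "zbx")]]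

def Spec_mapping_candidates_by_oldid_py (rows : List (List (String × String))) (out : List (String × List (List (String × String)))) : Prop := out = mapping_candidates_by_oldid_py_alt rows
instance (rows : List (List (String × String))) (out : List (String × List (List (String × String)))) : Decidable (Spec_mapping_candidates_by_oldid_py rows out) := by unfold Spec_mapping_candidates_by_oldid_py; infer_instance

-- ===== CLAIM (what is proved, stated in full; the proofs are below) =====
def Claim_equal_mapping_candidates_by_oldid_py : Prop := ∀ (rows : List (List (String × String))), Dom_mapping_candidates_by_oldid_py rows → Pre_mapping_candidates_by_oldid_py rows → Spec_mapping_candidates_by_oldid_py rows (mapping_candidates_by_oldid_py rows)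

-- ===== LEMMAS AND PROOFS =====

-- the strict lexicographic comparator sorted2 uses, abstracted over the two key maps
def pvLt {α κ₁ κ₂ : Type} [LT κ₁] [DecidableLT κ₁] [LT κ₂] [DecidableLT κ₂]
    (k1 : α → κ₁) (k2 : α → κ₂) (a b : α) : Bool :=
  decide (k1 a < k1 b) || (!decide (k1 b < k1 a) && decide (k2 a < k2 b))

theorem pvSorted2_eq_foldl {α : Type} (xs : List α) (k1 : α → Int) (k2 : α → String) :
    PySem.List.sorted2 xs k1 k2 =
      xs.foldl (fun acc x => PySem.List.insertBy (pvLt k1 k2) x acc) [] := rfl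

theorem pvLt_asymm {α κ₁ κ₂ : Type} [LinearOrder κ₁] [LinearOrder κ₂]
    {k1 : α → κ₁} {k2 : α → κ₂} {a b : α}
    (h : pvLt k1 k2 a b = true) : pvLt k1 k2 b a = false := by
  simp only [pvLt, Bool.or_eq_true, Bool.and_eq_true, Bool.not_eq_true',
    decide_eq_true_eq, decide_eq_false_iff_not] at h
  simp only [pvLt, Bool.or_eq_false_iff, Bool.and_eq_false_iff,
    decide_eq_true_eq, decide_eq_false_iff_not, Bool.not_eq_false']
  rcases h with h | ⟨h1, h2⟩
  · exact ⟨lt_asymm h, Or.inl (by simpa using h)⟩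
  · exact ⟨h1, Or.inr (by simpa using lt_asymm h2)⟩

theorem pvLt_trans_not {α κ₁ κ₂ : Type} [LinearOrder κ₁] [LinearOrder κ₂]
    {k1 : α → κ₁} {k2 : α → κ₂} {a b c : α}
    (hab : pvLt k1 k2 a b = true) (hcb : pvLt k1 k2 c b = false) :
    pvLt k1 k2 a c = true := by
  simp only [pvLt, Bool.or_eq_true, Bool.and_eq_true, Bool.not_eq_true',
    decide_eq_true_eq, decide_eq_false_iff_not, Bool.or_eq_false_iff,
    Bool.and_eq_false_iff, Bool.not_eq_false'] at hab hcb ⊢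
  rcases hcb with ⟨hcb1, hcb2⟩
  rcases hab with h | ⟨h1, h2⟩
  · exact Or.inl (lt_of_lt_of_le h (not_lt.mp hcb1))
  · rcases hcb2 with hbc | hk2
    · exact Or.inl (lt_of_le_of_lt (not_lt.mp h1) hbc)
    · refine Or.inr ⟨fun hca => ?_, lt_of_lt_of_le h2 ?_⟩
      · exact absurd (lt_of_lt_of_le hca (not_lt.mp h1)) hcb1
      · simpa using not_lt.mp (by simpa using hk2)

theorem pvInsertBy_map {α β : Type} (f : α → β) (ltb : β → β → Bool) (x : α) (ys : List α) :
    (PySem.List.insertBy (fun a b => ltb (f a) (f b)) x ys).map f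
      = PySem.List.insertBy ltb (f x) (ys.map f) := by
  induction ys with
  | nil => rfl
  | cons y ys ih =>
      simp only [PySem.List.insertBy, List.map]
      by_cases h : ltb (f x) (f y) = true
      · simp [h]
      · simp only [Bool.not_eq_true] at h
        simp [h, ih]

theorem pvPairwise_insertBy {α : Type} (lt : α → α → Bool)
    (hA : ∀ {a b : α}, lt a b = true → lt b a = false)
    (hT : ∀ {a b c : α}, lt a b = true → lt c b = false → lt a c = true)
    (x : α) (ys : List α) (h : ys.Pairwise (fun a b => lt b a = false)) :
    (PySem.List.insertBy lt x ys).Pairwise (fun a b => lt b a = false) := by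
  induction ys with
  | nil => simp [PySem.List.insertBy]
  | cons y ys ih =>
      rcases List.pairwise_cons.mp h with ⟨hy, htail⟩
      simp only [PySem.List.insertBy]
      by_cases hlt : lt x y = true
      · simp only [hlt, if_true]
        refine List.pairwise_cons.mpr ⟨?_, h⟩
        intro z hz
        rcases List.mem_cons.mp hz with rfl | hz
        · exact hA hlt
        · exact hA (hT hlt (hy z hz))
      · simp only [Bool.not_eq_true] at hlt
        simp only [hlt, Bool.false_eq_true, if_false]
        refine List.pairwise_cons.mpr ⟨?_, ih htail⟩
        intro z hz
        rcases (PySem.List.mem_insertBy lt x z ys).mp hz with rfl | hz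
        · exact hlt
        · exact hy z hz

theorem pvFilter_insertBy {α : Type} (lt : α → α → Bool)
    (_hA : ∀ {a b : α}, lt a b = true → lt b a = false)
    (hT : ∀ {a b c : α}, lt a b = true → lt c b = false → lt a c = true)
    (p : α → Bool) (x : α) (ys : List α) (h : ys.Pairwise (fun a b => lt b a = false)) :
    (PySem.List.insertBy lt x ys).filter p
      = if p x then PySem.List.insertBy lt x (ys.filter p) else ys.filter p := by
  induction ys with
  | nil => cases hp : p x <;> simp [PySem.List.insertBy, hp]
  | cons y ys ih =>
      rcases List.pairwise_cons.mp h with ⟨hy, htail⟩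
      simp only [PySem.List.insertBy]
      by_cases hxy : lt x y = true
      · rw [if_pos hxy]
        cases hp : p x with
        | false => simp [List.filter_cons, hp]
        | true =>
            have hall : ∀ z ∈ (y :: ys).filter p, lt x z = true := by
              intro z hz
              rcases List.mem_cons.mp (List.mem_of_mem_filter hz) with rfl | hz'
              · exact hxy
              · exact hT hxy (hy z hz')
            rw [if_pos rfl]
            cases hzs : (y :: ys).filter p with
            | nil => simp [hp, hzs, PySem.List.insertBy]
            | cons z zs =>
                have hxz : lt x z = true := hall z (by rw [hzs]; exact List.mem_cons_self)
                simp [hp, hzs, PySem.List.insertBy, hxz]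
      · simp only [Bool.not_eq_true] at hxy
        simp only [hxy, Bool.false_eq_true, if_false]
        rw [List.filter_cons, List.filter_cons]
        cases hp : p x
        · simp [hp, ih htail]
        · cases hpy : p y
          · simp [hp, ih htail]
          · simp [hp, ih htail, PySem.List.insertBy, hxy]

theorem pvFilter_sortfold {α : Type} (lt : α → α → Bool)
    (hA : ∀ {a b : α}, lt a b = true → lt b a = false)
    (hT : ∀ {a b c : α}, lt a b = true → lt c b = false → lt a c = true)
    (p : α → Bool) (xs acc : List α) (hacc : acc.Pairwise (fun a b => lt b a = false)) :
    (xs.foldl (fun acc x => PySem.List.insertBy lt x acc) acc).filter p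
      = (xs.filter p).foldl (fun acc x => PySem.List.insertBy lt x acc) (acc.filter p) := by
  induction xs generalizing acc with
  | nil => rfl
  | cons x xs ih =>
      simp only [List.foldl_cons, List.filter_cons]
      rw [ih _ (pvPairwise_insertBy lt hA hT x acc hacc),
          pvFilter_insertBy lt hA hT p x acc hacc]
      by_cases hp : p x = true
      · simp [hp]
      · simp only [Bool.not_eq_true] at hp; simp [hp]

theorem pvMap_sortfold {α β : Type} (f : α → β) (ltb : β → β → Bool) (xs acc : List α) :
    (xs.foldl (fun acc x => PySem.List.insertBy (fun a b => ltb (f a) (f b)) x acc) acc).map f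
      = (xs.map f).foldl (fun acc y => PySem.List.insertBy ltb y acc) (acc.map f) := by
  induction xs generalizing acc with
  | nil => rfl
  | cons x xs ih => simp only [List.foldl_cons, List.map_cons, ih, pvInsertBy_map]

-- the shared "keyed" list both ports distribute over
def pvKeyed (rows : List (List (String × String))) : List (String × List (String × String)) :=
  (rows.filter (fun r => pvGid r != "")).map (fun r => (pvGid r, r))

theorem pvA_fold_eq (rows : List (List (String × String)))
    (d : PySem.Dict String (List (List (String × String)))) :
    rows.foldl (fun b row =>
        let g := pvGid row
        if g = "" then b else PySem.Dict.modify b g [] (fun v => v ++ [row])) d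
      = (pvKeyed rows).foldl (fun b p => PySem.Dict.modify b p.1 [] (fun v => v ++ [p.2])) d := by
  induction rows generalizing d with
  | nil => rfl
  | cons r rows ih =>
      simp only [List.foldl_cons]
      by_cases h : pvGid r = ""
      · rw [ih]
        simp [pvKeyed, h]
      · rw [ih]
        simp [pvKeyed, h]

theorem pvB_keyed_eq (rows : List (List (String × String)))
    (acc : List (String × List (String × String))) :
    rows.foldl (fun acc row =>
        let g := pvGid row
        if g = "" then acc else acc ++ [(g, row)]) acc
      = acc ++ pvKeyed rows := by
  induction rows generalizing acc with
  | nil => simp [pvKeyed]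
  | cons r rows ih =>
      by_cases h : pvGid r = ""
      · simp only [List.foldl_cons, h, if_true]
        rw [ih]; simp [pvKeyed, h]
      · simp only [List.foldl_cons, h, if_false]
        rw [ih]; simp [pvKeyed, h]

-- each bucket: global stable sort then filter = filter then stable sort
theorem pvKey_filter (K : List (String × List (String × String))) (g : String) :
    PySem.List.sorted2 ((K.filter (fun p => p.1 == g)).map (fun x => x.2)) pvRank pvLower
      = ((PySem.List.sorted2 K (fun p => pvRank p.2) (fun p => pvLower p.2)).filter
          (fun p => p.1 == g)).map (fun x => x.2) := by
  have hA : ∀ {a b : String × List (String × String)},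
      pvLt (fun p : String × List (String × String) => pvRank p.2)
        (fun p => pvLower p.2) a b = true →
      pvLt (fun p : String × List (String × String) => pvRank p.2)
        (fun p => pvLower p.2) b a = false := fun h => pvLt_asymm h
  have hT : ∀ {a b c : String × List (String × String)},
      pvLt (fun p : String × List (String × String) => pvRank p.2)
        (fun p => pvLower p.2) a b = true →
      pvLt (fun p : String × List (String × String) => pvRank p.2)
        (fun p => pvLower p.2) c b = false →
      pvLt (fun p : String × List (String × String) => pvRank p.2)
        (fun p => pvLower p.2) a c = true := fun h h' => pvLt_trans_not h h'
  rw [pvSorted2_eq_foldl, pvSorted2_eq_foldl,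
      pvFilter_sortfold (pvLt (fun p : String × List (String × String) => pvRank p.2)
        (fun p => pvLower p.2)) hA hT (fun p => p.1 == g) K [] List.Pairwise.nil]
  simp only [List.filter_nil]
  exact (pvMap_sortfold (fun x : String × List (String × String) => x.2)
    (pvLt pvRank pvLower) (K.filter (fun p => p.1 == g)) []).symm

theorem pvGetD_seed (l : List String) (d : PySem.Dict String (List (List (String × String))))
    (g : String) (h : d.getD g [] = []) :
    (l.foldl (fun b x => PySem.Dict.insert b x []) d).getD g [] = [] := by
  induction l generalizing d with
  | nil => exact h
  | cons x l ih =>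
      refine ih _ ?_
      rw [PySem.Dict.getD_insert]
      split_ifs with hx
      · rfl
      · exact h

theorem pvMain (rows : List (List (String × String))) :
    mapping_candidates_by_oldid_py rows = mapping_candidates_by_oldid_py_alt rows := by
  simp only [mapping_candidates_by_oldid_py, mapping_candidates_by_oldid_py_alt]
  rw [pvA_fold_eq rows, pvB_keyed_eq rows []]
  simp only [List.nil_append]
  set K := pvKeyed rows with hK
  set D := PySem.List.dedup (K.map Prod.fst) with hD
  set sortedK := PySem.List.sorted2 K (fun p => pvRank p.2) (fun p => pvLower p.2) with hsK
  have hperm : (sortedK.map Prod.fst).Perm (K.map Prod.fst) :=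
    (PySem.List.sorted2_perm K _ _ false).map Prod.fst
  have hDnodup : D.Nodup := hD ▸ PySem.List.nodup_dedup _
  -- A-side bucket
  have hAkeys : ((K.foldl (fun b p => PySem.Dict.modify b p.1 [] (fun v => v ++ [p.2]))
      (PySem.Dict.empty : PySem.Dict String (List (List (String × String)))))).keys = D := by
    rw [PySem.Dict.keys_foldl_modify_key K Prod.fst [] (fun _ p v => v ++ [p.2]) PySem.Dict.empty]
    rw [PySem.Dict.keys_empty, PySem.Set.update_nil_left, hD, PySem.List.dedup_eq_ofList]
  have hAnodup : ((K.foldl (fun b p => PySem.Dict.modify b p.1 [] (fun v => v ++ [p.2]))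
      (PySem.Dict.empty : PySem.Dict String (List (List (String × String)))))).keys.Nodup := by
    rw [hAkeys]; exact PySem.List.nodup_dedup _
  -- B-side seeded dict
  have hSkeys : ((D.foldl (fun b g => PySem.Dict.insert b g [])
      (PySem.Dict.empty : PySem.Dict String (List (List (String × String)))))).keys = D := by
    rw [PySem.Dict.keys_foldl_insert D (fun _ _ => []) PySem.Dict.empty]
    rw [PySem.Dict.keys_empty, PySem.Set.update_nil_left,
        PySem.Set.ofList_eq_self_of_nodup D hDnodup]
  have hBkeys : ((sortedK.foldl (fun b p => PySem.Dict.modify b p.1 [] (fun v => v ++ [p.2]))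
      (D.foldl (fun b g => PySem.Dict.insert b g [])
        (PySem.Dict.empty : PySem.Dict String (List (List (String × String))))))).keys = D := by
    rw [PySem.Dict.keys_foldl_modify_key sortedK Prod.fst [] (fun _ p v => v ++ [p.2]) _, hSkeys]
    rw [PySem.Set.update_eq_append_filter]
    have : (PySem.Set.ofList (sortedK.map Prod.fst)).filter
        (fun y => !(PySem.Set.contains D y)) = [] := by
      apply List.filter_eq_nil_iff.mpr
      intro y hy
      have hyK : y ∈ K.map Prod.fst :=
        hperm.mem_iff.mp ((PySem.Set.mem_ofList _ _).mp hy)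
      have hyD : y ∈ D := hD ▸ (PySem.List.mem_dedup _ _).mpr hyK
      simp [hyD]
    rw [this, List.append_nil]
  have hBnodup : ((sortedK.foldl (fun b p => PySem.Dict.modify b p.1 [] (fun v => v ++ [p.2]))
      (D.foldl (fun b g => PySem.Dict.insert b g [])
        (PySem.Dict.empty : PySem.Dict String (List (List (String × String))))))).keys.Nodup := by
    rw [hBkeys]; exact PySem.List.nodup_dedup _
  rw [PySem.Dict.items_eq_map_keys _ hAnodup [], PySem.Dict.items_eq_map_keys _ hBnodup []]
  rw [hAkeys, hBkeys]
  simp only [List.map_map]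
  refine List.map_congr_left ?_
  intro g _
  simp only [Function.comp_apply]
  rw [PySem.Dict.getD_foldl_modify_append K PySem.Dict.empty g,
      PySem.Dict.getD_foldl_modify_append sortedK _ g,
      pvGetD_seed D PySem.Dict.empty g (by simp [PySem.Dict.getD_empty])]
  simp only [PySem.Dict.getD_empty, List.nil_append]
  rw [pvKey_filter K g]

-- ===== VERDICT (by name: the statement is the Claim_ definition above) =====
theorem mapping_candidates_by_oldid_py_spec : Claim_equal_mapping_candidates_by_oldid_py := by
  intro rows _ _
  unfold Spec_mapping_candidates_by_oldid_py
  exact pvMain rows
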